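-- pv_equiv track=rewrite | github.com/htreidel/intro2cs | ex4/hangman1.py | choose_letter
-- ===== SOURCE A (Python) =====
-- CHAR_A = 97
--
-- START_COUNT = 0
--
-- NUMBER_OF_LETTERS = 26
--
-- def histogram(n, num_list):
--     """recieves a positive integer and a list of numbers in
--        range of 0 to n-1, returns relevant histogram"""
--     L = []
--     L_counter = START_COUNT
--     histogram = []
--     histogram_counter = START_COUNT
--     for i in range(n):
--         L.append(L_counter)
--         L_counter += 1
--     for i in L:
--         histogram_counter = START_COUNT
--         for j in num_list:
--             if i == j:
--                 histogram_counter += 1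
--         histogram.append(histogram_counter)
--     return histogram
--
-- def letter_to_index(letter):
--  """
--  Return the index of the given letter in an alphabet list.
--  """
--  return ord(letter.lower()) - CHAR_A
--
-- def index_to_letter(index):
--  """
--  Return the letter corresponding to the given index.
--  """
--  return chr(index + CHAR_A)
--
-- def choose_letter(words, pattern):
--     """recieves a list of words and word pattern, all characters
--        must be either lowercase english alphabet or "_", and
--        returns most common letter (if there are two or more letters
--        that are most common will return the first in the list)"""
--     num_list = []
--     for i in words:
--         for j in i:
--             num_list.append(letter_to_index(j))
--     abc_histogram = histogram(NUMBER_OF_LETTERS, num_list)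
--     most_common_index = abc_histogram.index(max(abc_histogram))
--     most_common_letter = index_to_letter(most_common_index)
--     while most_common_letter in pattern:
--         abc_histogram[most_common_index] = 0
--         most_common_index = abc_histogram.index(max(abc_histogram))
--         most_common_letter = index_to_letter(most_common_index)
--     return most_common_letter
-- ===== SOURCE B (Python) =====
-- def choose_letter(words, pattern):
--     """recieves a list of words and word pattern, all characters
--        must be either lowercase english alphabet or "_", and
--        returns most common letter (if there are two or more letters
--        that are most common will return the first in the list)"""
--     counts = [0] * 26
--     for word in words:
--         for ch in word:
--             i = ord(ch.lower()) - 97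
--             if 0 <= i < 26:
--                 counts[i] += 1
--     candidates = [i for i in range(26) if chr(97 + i) not in pattern]
--     if not candidates:
--         return ""
--     return chr(97 + max(candidates, key=lambda i: counts[i]))
-- ===== Notes on version B (the rewrite author's own statement) =====
-- stated objective: simpler
-- what changed: B counts letter frequencies in a single pass into a 26-entry array and directly returns the letter with maximal count (lowest index on ties) among letters not in pattern, replacing A's histogram that rescans the whole letter list 26 times and its repeated max-scan-and-zero while loop.
import Mathlib
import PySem

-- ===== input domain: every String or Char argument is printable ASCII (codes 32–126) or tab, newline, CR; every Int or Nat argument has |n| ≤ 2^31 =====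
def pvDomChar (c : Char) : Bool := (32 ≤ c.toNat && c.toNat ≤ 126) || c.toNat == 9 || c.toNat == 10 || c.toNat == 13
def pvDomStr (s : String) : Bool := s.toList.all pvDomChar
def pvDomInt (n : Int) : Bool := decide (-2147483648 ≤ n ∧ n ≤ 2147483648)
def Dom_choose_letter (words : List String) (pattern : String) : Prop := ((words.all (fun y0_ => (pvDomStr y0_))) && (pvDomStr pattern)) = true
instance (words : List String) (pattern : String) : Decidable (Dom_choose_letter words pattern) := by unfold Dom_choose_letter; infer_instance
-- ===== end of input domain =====

-- B replaces A's 26-pass histogram and its repeated max-scan-and-zero while loop by one counting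
-- pass and a single keyed max over the letters not in pattern (shorter and plainer than A).

-- ===== PORT A =====
-- letter_to_index(letter): ord(letter.lower()) - 97
def pvLetterToIndex (letter : Char) : Int :=
  (Int.ofNat (PySem.Chars.lowerChar letter).toNat) - 97

-- index_to_letter(index): chr(index + 97); exact for the indices 0..25 A passes in
def pvIndexToLetter (index : Int) : Char :=
  Char.ofNat (index + 97).toNat

-- histogram(n, num_list): the two accumulation loops, transliterated as folds
def pvHistogram (n : Int) (num_list : List Int) : List Int :=
  let Lc := (PySem.List.pyRange 0 n 1).foldl
      (fun (st : List Int × Int) _ => (st.1 ++ [st.2], st.2 + 1)) ([], 0)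
  Lc.1.foldl (fun hist i =>
      hist ++ [num_list.foldl (fun c j => if i == j then c + 1 else c) (0 : Int)]) []

-- the while loop: each pass computes max / first index of max / its letter, tests membership
-- ("letter in pattern" on a 1-char string), zeroes that slot and repeats.  Fuel 27 is a totality
-- guard only: under Pre_ each looping pass zeroes a positive slot (≤ 26 of them) and then returns.
def pvChooseLoop (pattern : String) : Nat → List Int → String
  | 0, _ => ""
  | fuel+1, hist =>
      let m := (PySem.List.max? hist (fun x => x)).getD 0
      let idx := (PySem.List.index? hist m).getD 0
      let letter := pvIndexToLetter (idx : Int)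
      if PySem.Str.isIn (String.ofList [letter]) pattern then
        pvChooseLoop pattern fuel (hist.set idx 0)
      else
        String.ofList [letter]

def choose_letter (words : List String) (pattern : String) : String :=
  let num_list := words.foldl
      (fun acc i => i.toList.foldl (fun acc j => acc ++ [pvLetterToIndex j]) acc) []
  let abc_histogram := pvHistogram 26 num_list
  pvChooseLoop pattern 27 abc_histogram

-- ===== PORT B =====
def choose_letter_alt (words : List String) (pattern : String) : String :=
  let counts := words.foldl (fun cs word => word.toList.foldl (fun cs ch =>
      let i := (Int.ofNat (PySem.Chars.lowerChar ch).toNat) - 97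
      if 0 ≤ i ∧ i < 26 then cs.set i.toNat (cs.getD i.toNat 0 + 1) else cs) cs)
    (List.replicate 26 (0 : Int))
  let candidates := (PySem.List.pyRange 0 26 1).filter
      (fun i => !(PySem.Str.isIn (String.ofList [Char.ofNat (97 + i).toNat]) pattern))
  match PySem.List.max? candidates (fun i => PySem.List.pyGetD counts i 0) with
  | some i => String.ofList [Char.ofNat (97 + i).toNat]
  | none => ""

-- ===== PRECONDITION & SPEC =====
-- Pre_ excludes exactly the inputs on which A's while loop never terminates (A returns no value
-- there, it diverges): those where every a-z letter occurring (lowercased) in words is in pattern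
-- and 'a' is in pattern too.
def Pre_choose_letter (words : List String) (pattern : String) : Prop :=
  (∃ w ∈ words, ∃ c ∈ w.toList,
      97 ≤ (PySem.Chars.lowerChar c).toNat ∧ (PySem.Chars.lowerChar c).toNat ≤ 122 ∧
      PySem.Chars.lowerChar c ∉ pattern.toList)
  ∨ 'a' ∉ pattern.toList
instance (words : List String) (pattern : String) : Decidable (Pre_choose_letter words pattern) := by
  unfold Pre_choose_letter; infer_instance

def pvWitness_choose_letter : List String × String := ([], "xyz")

def Spec_choose_letter (words : List String) (pattern : String) (out : String) : Prop := out = choose_letter_alt words pattern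
instance (words : List String) (pattern : String) (out : String) : Decidable (Spec_choose_letter words pattern out) := by unfold Spec_choose_letter; infer_instance

-- ===== CLAIM (what is proved, stated in full; the proofs are below) =====
def Claim_equal_choose_letter : Prop := ∀ (words : List String) (pattern : String), Dom_choose_letter words pattern → Pre_choose_letter words pattern → Spec_choose_letter words pattern (choose_letter words pattern)

-- ===== LEMMAS AND PROOFS =====
def pvMaxStep {α : Type} (key : α → Int) (acc : Option α) (x : α) : Option α :=
  match acc with
  | none => some x
  | some m => if key m < key x then some x else some m

lemma pvMax?_eq_foldl {α : Type} (key : α → Int) (l : List α) :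
    PySem.List.max? l key = List.foldl (pvMaxStep key) none l := rfl

lemma pvMaxFoldKeep {α : Type} (key : α → Int) (m : α) (suf : List α)
    (h : ∀ y ∈ suf, key y ≤ key m) :
    List.foldl (pvMaxStep key) (some m) suf = some m := by
  induction suf with
  | nil => rfl
  | cons y t ih =>
      have hy : ¬ key m < key y := not_lt.mpr (h y (by simp))
      simp only [List.foldl, pvMaxStep, hy, if_false]
      exact ih (fun z hz => h z (by simp [hz]))

lemma pvMax?_first {α : Type} (key : α → Int) (pre suf : List α) (x : α)
    (hpre : ∀ y ∈ pre, key y < key x) (hsuf : ∀ y ∈ suf, key y ≤ key x) :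
    PySem.List.max? (pre ++ x :: suf) key = some x := by
  rw [pvMax?_eq_foldl]
  have main : ∀ (pre : List α) (acc : Option α),
      (∀ y ∈ pre, key y < key x) →
      (acc = none ∨ ∃ m, acc = some m ∧ key m < key x) →
      List.foldl (pvMaxStep key) acc (pre ++ x :: suf) = some x := by
    intro pre
    induction pre with
    | nil =>
        intro acc _ hacc
        have hstep : pvMaxStep key acc x = some x := by
          rcases hacc with h | ⟨m, rfl, hm⟩
          · subst h; rfl
          · simp only [pvMaxStep, hm, if_true]
        rw [List.nil_append, List.foldl_cons, hstep]
        exact pvMaxFoldKeep key x suf hsuf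
    | cons y t ih =>
        intro acc hy hacc
        rw [List.cons_append, List.foldl_cons]
        refine ih _ (fun z hz => hy z (by simp [hz])) ?_
        rcases hacc with h | ⟨m, rfl, hm⟩
        · subst h; exact Or.inr ⟨y, rfl, hy y (by simp)⟩
        · by_cases hc : key m < key y
          · simp only [pvMaxStep, hc, if_true]; exact Or.inr ⟨y, rfl, hy y (by simp)⟩
          · simp only [pvMaxStep, hc, if_false]; exact Or.inr ⟨m, rfl, hm⟩
  exact main pre none hpre (Or.inl rfl)

lemma pvMax?_congr {α : Type} (l : List α) (k1 k2 : α → Int)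
    (h : ∀ x ∈ l, k1 x = k2 x) : PySem.List.max? l k1 = PySem.List.max? l k2 := by
  rw [pvMax?_eq_foldl, pvMax?_eq_foldl]
  have main : ∀ (l : List α) (acc : Option α),
      (∀ x ∈ l, k1 x = k2 x) → (∀ m, acc = some m → k1 m = k2 m) →
      List.foldl (pvMaxStep k1) acc l = List.foldl (pvMaxStep k2) acc l := by
    intro l
    induction l with
    | nil => intro acc _ _; rfl
    | cons y t ih =>
        intro acc hl hacc
        rw [List.foldl_cons, List.foldl_cons]
        have hstep : pvMaxStep k1 acc y = pvMaxStep k2 acc y := by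
          rcases hacc' : acc with _ | m
          · rfl
          · have hm := hacc m hacc'
            simp only [pvMaxStep, hm, hl y (by simp)]
        rw [hstep]
        refine ih _ (fun z hz => hl z (by simp [hz])) ?_
        intro m hm
        rcases hacc2 : acc with _ | m2
        · subst hacc2; simp only [pvMaxStep] at hm; cases hm; exact hl y (by simp)
        · subst hacc2
          simp only [pvMaxStep] at hm
          split at hm
          · cases hm; exact hl y (by simp)
          · exact hacc m hm
  exact main l none h (by simp)

lemma pvCountP_set_lt (l : List Int) (k : Nat) (hk : k < l.length) (hpos : 0 < l[k]) :
    (l.set k 0).countP (fun x => decide (0 < x)) < l.countP (fun x => decide (0 < x)) := by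
  induction l generalizing k with
  | nil => simp at hk
  | cons y t ih =>
      cases k with
      | zero =>
          simp only [List.set_cons_zero, List.countP_cons]
          simp only [List.getElem_cons_zero] at hpos
          simp [hpos]
      | succ k =>
          simp only [List.set_cons_succ, List.countP_cons]
          have := ih k (by simpa using hk) (by simpa using hpos)
          omega

lemma pvHistogram_eq (nl : List Int) :
    pvHistogram 26 nl = (PySem.List.pyRange 0 26 1).map (fun i => ((nl.count i : Nat) : Int)) := by
  have hL : (PySem.List.pyRange 0 26 1).foldl
      (fun (st : List Int × Int) _ => (st.1 ++ [st.2], st.2 + 1)) ([], 0)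
      = (PySem.List.pyRange 0 26 1, 26) := by decide
  unfold pvHistogram
  rw [hL]
  rw [PySem.List.foldl_append_singleton_eq_map
    (fun i => nl.foldl (fun c j => if i == j then c + 1 else c) (0 : Int)) (PySem.List.pyRange 0 26 1) []]
  rw [List.nil_append]
  apply List.map_congr_left
  intro i _
  have : ∀ j c : Int, (i == j) = (j == i) := by intro j c; simp [eq_comm]
  simp only [this (c := 0)]
  rw [PySem.List.foldl_beq_add_one nl i 0]
  simp

lemma pvNumList_eq (words : List String) :
    words.foldl (fun acc i => i.toList.foldl (fun acc j => acc ++ [pvLetterToIndex j]) acc) []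
      = (words.flatMap (fun w => w.toList)).map pvLetterToIndex := by
  have main : ∀ (ws : List String) (acc : List Int),
      ws.foldl (fun acc i => i.toList.foldl (fun acc j => acc ++ [pvLetterToIndex j]) acc) acc
        = acc ++ (ws.flatMap (fun w => w.toList)).map pvLetterToIndex := by
    intro ws
    induction ws with
    | nil => intro acc; simp
    | cons w t ih =>
        intro acc
        rw [List.foldl_cons, PySem.List.foldl_append_singleton_eq_map, ih]
        simp
  simpa using main words []

def pvStep (cs : List Int) (ch : Char) : List Int :=
  if 0 ≤ pvLetterToIndex ch ∧ pvLetterToIndex ch < 26 then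
    cs.set (pvLetterToIndex ch).toNat (cs.getD (pvLetterToIndex ch).toNat 0 + 1)
  else cs

lemma pvStep_length (cs : List Int) (ch : Char) : (pvStep cs ch).length = cs.length := by
  unfold pvStep
  split
  · simp
  · simp

lemma pvStep_getD (cs : List Int) (ch : Char) (k : Nat) (hk : k < 26) (hcs : cs.length = 26) :
    (pvStep cs ch).getD k 0 = cs.getD k 0 + (if pvLetterToIndex ch = (k : Int) then 1 else 0) := by
  unfold pvStep
  split
  · rename_i hrange
    have hj : (pvLetterToIndex ch).toNat < 26 := by omega
    have hik : pvLetterToIndex ch = (k : Int) ↔ (pvLetterToIndex ch).toNat = k := by omega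
    by_cases he : (pvLetterToIndex ch).toNat = k
    · rw [List.getD_eq_getElem _ _ (by rw [List.length_set]; omega),
          List.getD_eq_getElem _ _ (by omega : k < cs.length)]
      rw [List.getD_eq_getElem _ _ (by omega : (pvLetterToIndex ch).toNat < cs.length)]
      simp [he, hik]
    · rw [List.getD_eq_getElem _ _ (by rw [List.length_set]; omega),
          List.getD_eq_getElem _ _ (by omega : k < cs.length)]
      simp [he, hik]
  · rename_i hrange
    have : ¬ (pvLetterToIndex ch = (k : Int)) := by omega
    simp [this]
lemma pvCounts_main : ∀ (l : List Char) (cs : List Int), cs.length = 26 →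
    (l.foldl pvStep cs).length = 26 ∧
    ∀ k : Nat, k < 26 → (l.foldl pvStep cs).getD k 0
      = cs.getD k 0 + (((l.map pvLetterToIndex).count (k : Int) : Nat) : Int) := by
  intro l
  induction l with
  | nil => intro cs h; exact ⟨h, by simp⟩
  | cons ch t ih =>
      intro cs h
      rw [List.foldl_cons]
      obtain ⟨hlen, hget⟩ := ih (pvStep cs ch) (by rw [pvStep_length]; exact h)
      refine ⟨hlen, ?_⟩
      intro k hk
      rw [hget k hk, pvStep_getD cs ch k hk h]
      rw [List.map_cons, List.count_cons]
      by_cases he : pvLetterToIndex ch = (k : Int) <;> simp [he] <;> omega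

def pvLetter (i : Int) : Char := Char.ofNat (97 + i).toNat
def pvGood (pattern : String) (i : Int) : Bool :=
  !(PySem.Str.isIn (String.ofList [pvLetter i]) pattern)
def pvCands (pattern : String) : List Int :=
  (PySem.List.pyRange 0 26 1).filter (pvGood pattern)

lemma pvIndexToLetter_eq (i : Int) : pvIndexToLetter i = pvLetter i := by
  simp [pvIndexToLetter, pvLetter, Int.add_comm]

lemma pvKeyNat (hist : List Int) (hlen : hist.length = 26) (j : Nat) (hj : j < 26) :
    PySem.List.pyGetD hist (j : Int) 0 = hist[j]'(by omega) := by
  rw [PySem.List.pyGetD_natCast, List.getD_eq_getElem _ _ (by omega)]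

lemma pvLoop_eq (pattern : String) (fuel : Nat) (hist : List Int)
    (hlen : hist.length = 26) (hnn : ∀ x ∈ hist, 0 ≤ x)
    (hP : (∃ k : Nat, ∃ hk : k < hist.length, 0 < hist[k] ∧ pvGood pattern (k : Int)) ∨ pvGood pattern 0)
    (hfuel : hist.countP (fun x => decide (0 < x)) < fuel) :
    pvChooseLoop pattern fuel hist =
      match PySem.List.max? (pvCands pattern) (fun i => PySem.List.pyGetD hist i 0) with
      | some i => String.ofList [pvLetter i]
      | none => "" := by
  induction fuel generalizing hist with
  | zero => omega
  | succ f ih =>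
      -- the maximum and its first index
      obtain ⟨mv, hm⟩ : ∃ mv, PySem.List.max? hist (fun x => x) = some mv := by
        rcases h : PySem.List.max? hist (fun x => x) with _ | mv
        · rw [PySem.List.max?_eq_none_iff] at h; simp [h] at hlen
        · exact ⟨mv, rfl⟩
      have hmax : ∀ y ∈ hist, y ≤ mv := by
        have := PySem.List.max?_isMax (key := fun x => x) hm
        simpa using this
      have hmem : mv ∈ hist := PySem.List.max?_mem hm
      obtain ⟨k, hidx⟩ : ∃ k, PySem.List.index? hist mv = some k := by
        rcases h : PySem.List.index? hist mv with _ | k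
        · rw [PySem.List.index?_eq_none_iff] at h; exact absurd hmem h
        · exact ⟨k, rfl⟩
      obtain ⟨hk, hke, hkfirst⟩ := PySem.List.getElem_of_index?_eq_some hidx
      have hk26 : k < 26 := by omega
      -- one unfolding of the loop
      rw [pvChooseLoop]
      simp only [hm, hidx, Option.getD_some]
      by_cases hin : PySem.Str.isIn (String.ofList [pvIndexToLetter (k : Int)]) pattern = true
      · -- letter in pattern: A zeroes slot k and loops; the candidate keys are unchanged
        rw [if_pos hin]
        have hbad : pvGood pattern (k : Int) = false := by
          rw [pvGood, ← pvIndexToLetter_eq, hin]; rfl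
        -- mv > 0
        have hmv : 0 < mv := by
          rcases lt_or_ge 0 mv with h | h
          · exact h
          · exfalso
            have hall : ∀ x ∈ hist, x = 0 := fun x hx => le_antisymm (le_trans (hmax x hx) h) (hnn x hx)
            have hk0 : k = 0 := by
              have h0 : hist[0]'(by omega) = mv := by
                have h1 := hall _ (List.getElem_mem (by omega : 0 < hist.length))
                have h2 := hall _ (List.getElem_mem hk)
                omega
              by_contra hne
              exact hkfirst 0 (by omega) h0
            rcases hP with ⟨k', hk', hpos, hgood⟩ | hgood
            · have := hall _ (List.getElem_mem hk'); omega
            · have : pvGood pattern ((k : Nat) : Int) = true := by subst hk0; simpa using hgood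
              rw [this] at hbad; exact absurd hbad (by simp)
        have hkpos : 0 < hist[k] := by omega
        -- apply the induction hypothesis to the zeroed histogram
        have hlen' : (hist.set k 0).length = 26 := by simp [hlen]
        have hnn' : ∀ x ∈ hist.set k 0, 0 ≤ x := by
          intro x hx
          rcases List.mem_or_eq_of_mem_set hx with h | h
          · exact hnn x h
          · omega
        have hP' : (∃ k' : Nat, ∃ hk' : k' < (hist.set k 0).length, 0 < (hist.set k 0)[k'] ∧ pvGood pattern (k' : Int)) ∨ pvGood pattern 0 := by
          rcases hP with ⟨k', hk', hpos, hgood⟩ | hgood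
          · left
            have hne : k ≠ k' := by
              intro h; subst h; simp [hgood] at hbad
            refine ⟨k', by simpa using hk', ?_, hgood⟩
            rw [List.getElem_set_ne hne]
            exact hpos
          · right; exact hgood
        have hfuel' : (hist.set k 0).countP (fun x => decide (0 < x)) < f :=
          lt_of_lt_of_le (pvCountP_set_lt hist k hk hkpos) (by
            have := hfuel; omega)
        rw [ih (hist.set k 0) hlen' hnn' hP' hfuel']
        -- the candidate keys did not change
        have hcongr : PySem.List.max? (pvCands pattern) (fun i => PySem.List.pyGetD (hist.set k 0) i 0)
            = PySem.List.max? (pvCands pattern) (fun i => PySem.List.pyGetD hist i 0) := by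
          apply pvMax?_congr
          intro i hi
          rw [pvCands, List.mem_filter] at hi
          obtain ⟨hir, hig⟩ := hi
          rw [PySem.List.mem_pyRange_one] at hir
          have hj : i = ((i.toNat : Nat) : Int) := by omega
          have hj26 : i.toNat < 26 := by omega
          have hne : k ≠ i.toNat := by
            intro h
            rw [hj, ← h] at hig
            rw [hig] at hbad; exact absurd hbad (by simp)
          rw [hj, pvKeyNat _ hlen' _ hj26, pvKeyNat _ hlen _ hj26]
          exact List.getElem_set_ne hne _
        rw [hcongr]
      · -- letter not in pattern: A returns it; it is the first maximal candidate
        rw [if_neg hin]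
        have hgoodk : pvGood pattern (k : Int) = true := by
          have hfalse : PySem.Str.isIn (String.ofList [pvIndexToLetter (k : Int)]) pattern = false := by
            revert hin; cases PySem.Str.isIn (String.ofList [pvIndexToLetter (k : Int)]) pattern <;> simp
          rw [pvGood, ← pvIndexToLetter_eq, hfalse]; rfl
        have hsplit : pvCands pattern
            = ((PySem.List.pyRange 0 k 1).filter (pvGood pattern))
              ++ (k : Int) :: ((PySem.List.pyRange ((k : Int)+1) 26 1).filter (pvGood pattern)) := by
          rw [pvCands, PySem.List.pyRange_one_append 0 (k : Int) 26 (by omega) (by omega),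
              PySem.List.pyRange_one_cons (by omega : (k : Int) < 26)]
          rw [List.filter_append, List.filter_cons_of_pos (by exact hgoodk)]
        have hmaxc : PySem.List.max? (pvCands pattern) (fun i => PySem.List.pyGetD hist i 0) = some (k : Int) := by
          rw [hsplit]
          apply pvMax?_first
          · intro y hy
            rw [List.mem_filter, PySem.List.mem_pyRange_one] at hy
            obtain ⟨⟨h0, hyk⟩, _⟩ := hy
            have hj : y = ((y.toNat : Nat) : Int) := by omega
            have hj26 : y.toNat < 26 := by omega
            rw [hj, pvKeyNat _ hlen _ hj26, pvKeyNat _ hlen _ hk26]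
            have hle : hist[y.toNat]'(by omega) ≤ mv := hmax _ (List.getElem_mem (by omega))
            have hne : hist[y.toNat]'(by omega) ≠ mv := hkfirst y.toNat (by omega)
            omega
          · intro y hy
            rw [List.mem_filter, PySem.List.mem_pyRange_one] at hy
            obtain ⟨⟨h0, hy26⟩, _⟩ := hy
            have hj : y = ((y.toNat : Nat) : Int) := by omega
            have hj26 : y.toNat < 26 := by omega
            rw [hj, pvKeyNat _ hlen _ hj26, pvKeyNat _ hlen _ hk26]
            have hle : hist[y.toNat]'(by omega) ≤ mv := hmax _ (List.getElem_mem (by omega))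
            omega
        rw [hmaxc, pvIndexToLetter_eq]

lemma pvIsIn_single (c : Char) (s : String) :
    PySem.Str.isIn (String.ofList [c]) s = s.toList.contains c := by
  rw [Bool.eq_iff_iff]
  simp [PySem.Str.isIn, PySem.Chars.isIn_iff_infix, List.singleton_infix_iff]

def pvHistSpec (words : List String) : List Int :=
  (PySem.List.pyRange 0 26 1).map
    (fun i => ((((words.flatMap (fun w => w.toList)).map pvLetterToIndex).count i : Nat) : Int))

lemma pvHistSpec_length (words : List String) : (pvHistSpec words).length = 26 := by
  simp [pvHistSpec, PySem.List.length_pyRange_one]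

lemma pvHistSpec_getElem (words : List String) (k : Nat) (hk : k < 26) :
    (pvHistSpec words)[k]'(by rw [pvHistSpec_length]; omega)
      = ((((words.flatMap (fun w => w.toList)).map pvLetterToIndex).count ((k : Nat) : Int) : Nat) : Int) := by
  unfold pvHistSpec
  rw [List.getElem_map, PySem.List.getElem_pyRange_one]
  norm_num

lemma pvCounts_eq_histSpec (words : List String) :
    (words.flatMap (fun w => w.toList)).foldl pvStep (List.replicate 26 (0 : Int))
      = pvHistSpec words := by
  obtain ⟨hlen, hget⟩ := pvCounts_main (words.flatMap (fun w => w.toList))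
    (List.replicate 26 (0 : Int)) (by simp)
  apply List.ext_getElem (by rw [hlen, pvHistSpec_length])
  intro k h1 h2
  have hk26 : k < 26 := by rw [hlen] at h1; exact h1
  rw [← List.getD_eq_getElem _ 0 h1, hget k hk26, pvHistSpec_getElem words k hk26]
  have hz : (List.replicate 26 (0 : Int)).getD k 0 = 0 := by
    rw [List.getD_eq_getElem _ _ (by simpa using hk26), List.getElem_replicate]
  rw [hz]
  omega

lemma pvGlue (words : List String) (pattern : String)
    (hpre : (∃ w ∈ words, ∃ c ∈ w.toList,
        97 ≤ (PySem.Chars.lowerChar c).toNat ∧ (PySem.Chars.lowerChar c).toNat ≤ 122 ∧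
        PySem.Chars.lowerChar c ∉ pattern.toList)
      ∨ 'a' ∉ pattern.toList) :
    pvChooseLoop pattern 27 (pvHistSpec words)
      = match PySem.List.max? (pvCands pattern) (fun i => PySem.List.pyGetD (pvHistSpec words) i 0) with
        | some i => String.ofList [pvLetter i]
        | none => "" := by
  apply pvLoop_eq
  · exact pvHistSpec_length words
  · intro x hx
    unfold pvHistSpec at hx
    rw [List.mem_map] at hx
    obtain ⟨i, _, rfl⟩ := hx
    positivity
  · -- the precondition gives a good slot
    rcases hpre with ⟨w, hw, c, hc, h97, h122, hnotin⟩ | hnotin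
    · left
      set t := (PySem.Chars.lowerChar c).toNat with ht
      refine ⟨t - 97, by rw [pvHistSpec_length]; omega, ?_, ?_⟩
      · rw [pvHistSpec_getElem words (t - 97) (by omega)]
        have hmem : (((t - 97 : Nat) : Int)) ∈ (words.flatMap (fun w => w.toList)).map pvLetterToIndex := by
          rw [List.mem_map]
          refine ⟨c, ?_, ?_⟩
          · rw [List.mem_flatMap]; exact ⟨w, hw, hc⟩
          · show Int.ofNat (PySem.Chars.lowerChar c).toNat - 97 = ((t - 97 : Nat) : Int)
            rw [← ht]
            push_cast [Int.ofNat_eq_natCast]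
            omega
        have := List.count_pos_iff.mpr hmem
        omega
      · have hletter : pvLetter ((t - 97 : Nat) : Int) = PySem.Chars.lowerChar c := by
          rw [pvLetter]
          have : ((97 : Int) + ((t - 97 : Nat) : Int)).toNat = t := by omega
          rw [this, ht, Char.ofNat_toNat]
        rw [pvGood, hletter, pvIsIn_single]
        simp [hnotin]
    · right
      have hletter : pvLetter 0 = 'a' := by decide
      rw [pvGood, hletter, pvIsIn_single]
      simp [hnotin]
  · calc (pvHistSpec words).countP (fun x => decide (0 < x))
        ≤ (pvHistSpec words).length := List.countP_le_length
      _ < 27 := by rw [pvHistSpec_length]; omega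

lemma pvMain (words : List String) (pattern : String)
    (hpre : Pre_choose_letter words pattern) :
    choose_letter words pattern = choose_letter_alt words pattern := by
  have hA : choose_letter words pattern = pvChooseLoop pattern 27 (pvHistSpec words) := by
    show pvChooseLoop pattern 27 (pvHistogram 26 (words.foldl
      (fun acc i => i.toList.foldl (fun acc j => acc ++ [pvLetterToIndex j]) acc) [])) = _
    rw [pvNumList_eq, pvHistogram_eq]
    rfl
  have hB : choose_letter_alt words pattern
      = match PySem.List.max? (pvCands pattern)
          (fun i => PySem.List.pyGetD (pvHistSpec words) i 0) with
        | some i => String.ofList [pvLetter i]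
        | none => "" := by
    show (match PySem.List.max? (pvCands pattern)
        (fun i => PySem.List.pyGetD (words.foldl (fun cs word => word.toList.foldl pvStep cs)
          (List.replicate 26 (0 : Int))) i 0) with
      | some i => String.ofList [pvLetter i]
      | none => "") = _
    rw [← List.foldl_flatMap, pvCounts_eq_histSpec]
  rw [hA, hB, pvGlue words pattern hpre]

-- ===== VERDICT (by name: the statement is the Claim_ definition above) =====
theorem choose_letter_spec : Claim_equal_choose_letter := by
  intro words pattern _ hpre
  exact pvMain words pattern hpre
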